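-- pv_equiv track=rewrite | github.com/ngominhchau24/practice_synthesis | lab1/implicants.py | combine_if_one_bit_diff
-- ===== SOURCE A (Python) =====
-- def combine_if_one_bit_diff(a: str, b: str) -> str | None:
--     """
--     Chỉ cho gộp nếu:
--       - Tất cả các vị trí đều bằng nhau, TRỪ đúng 1 vị trí là 0/1 đối nghịch.
--       - Ở các vị trí có '-', cả hai phải đều '-' (không cho case '-' vs '0/1').
--     """
--     diff = 0
--     out = []
--     for xa, xb in zip(a, b):
--         if xa == xb:
--             out.append(xa)  # có thể là '0'/'1' hoặc '-' giống nhau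
--         else:
--             # nếu một bên là '-' còn bên kia là bit xác định -> KHÔNG gộp được
--             if xa == '-' or xb == '-':
--                 return None
--             # khác nhau 0 vs 1 -> tính 1 khác biệt
--             diff += 1
--             if diff > 1:
--                 return None
--             out.append('-')
--     # phải đúng 1 khác biệt
--     if diff != 1:
--         return None
--     return ''.join(out)
-- ===== SOURCE B (Python) =====
-- def combine_if_one_bit_diff(a: str, b: str) -> str | None:
--     pairs = list(zip(a, b))
--     diffs = [i for i in range(len(pairs)) if pairs[i][0] != pairs[i][1]]
--     if any(pairs[i][0] == '-' or pairs[i][1] == '-' for i in diffs):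
--         return None
--     if len(diffs) != 1:
--         return None
--     out = [x for x, _ in pairs]
--     out[diffs[0]] = '-'
--     return ''.join(out)
-- ===== Notes on version B (the rewrite author's own statement) =====
-- stated objective: alternative
-- what changed: Replaces A's fused accumulate-and-early-exit loop (building the output while counting differences) with a detect-then-construct decomposition: first collect the differing indices, validate them, then build the output by setting the single differing position to '-'.
import Mathlib
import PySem

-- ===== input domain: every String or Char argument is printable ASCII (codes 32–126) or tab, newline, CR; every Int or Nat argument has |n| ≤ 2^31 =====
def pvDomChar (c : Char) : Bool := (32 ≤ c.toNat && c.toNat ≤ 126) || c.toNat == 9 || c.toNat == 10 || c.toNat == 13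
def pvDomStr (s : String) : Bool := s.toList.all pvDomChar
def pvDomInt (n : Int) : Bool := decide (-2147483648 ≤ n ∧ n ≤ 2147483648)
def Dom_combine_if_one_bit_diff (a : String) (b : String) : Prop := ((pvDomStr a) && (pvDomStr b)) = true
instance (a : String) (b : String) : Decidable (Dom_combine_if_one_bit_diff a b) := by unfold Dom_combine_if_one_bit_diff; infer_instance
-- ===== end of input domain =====

-- B replaces A's fused accumulate-and-early-exit loop with a detect-then-construct
-- decomposition (collect differing indices, validate, then set one position to '-');
-- objective: alternative (same cost, different structure).

-- ===== PORT A =====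
-- the for-loop over zip(a,b) with state (diff, out); out accumulated in reverse
def pvLoopA : List (Char × Char) → Nat → List Char → Option String
  | [], diff, out => if diff ≠ 1 then none else some (String.mk out.reverse)
  | (xa, xb) :: rest, diff, out =>
    if xa = xb then pvLoopA rest diff (xa :: out)
    else if xa = '-' ∨ xb = '-' then none
    else if diff + 1 > 1 then none
    else pvLoopA rest (diff + 1) ('-' :: out)

def combine_if_one_bit_diff (a : String) (b : String) : Option String :=
  pvLoopA (a.toList.zip b.toList) 0 []

-- ===== PORT B =====
def combine_if_one_bit_diff_alt (a : String) (b : String) : Option String :=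
  let pairs := a.toList.zip b.toList
  let diffs := (List.range pairs.length).filter
      (fun i => (pairs.getD i ('?', '?')).1 ≠ (pairs.getD i ('?', '?')).2)
  if diffs.any (fun i => (pairs.getD i ('?', '?')).1 = '-' ∨ (pairs.getD i ('?', '?')).2 = '-') then none
  else if diffs.length ≠ 1 then none
  else some (String.mk ((pairs.map Prod.fst).set (diffs.headD 0) '-'))

-- ===== PRECONDITION & SPEC =====
def Spec_combine_if_one_bit_diff (a : String) (b : String) (out : Option String) : Prop := out = combine_if_one_bit_diff_alt a b
instance (a : String) (b : String) (out : Option String) : Decidable (Spec_combine_if_one_bit_diff a b out) := by unfold Spec_combine_if_one_bit_diff; infer_instance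

-- ===== CLAIM (what is proved, stated in full; the proofs are below) =====
def Claim_equal_combine_if_one_bit_diff : Prop := ∀ (a : String) (b : String), Dom_combine_if_one_bit_diff a b → Spec_combine_if_one_bit_diff a b (combine_if_one_bit_diff a b)

-- ===== LEMMAS AND PROOFS =====

-- number of differing positions
def pvCnt (l : List (Char × Char)) : Nat := (l.filter (fun p => p.1 ≠ p.2)).length
-- some differing position carries a '-'
def pvDash (l : List (Char × Char)) : Bool := l.any (fun p => decide (p.1 ≠ p.2 ∧ (p.1 = '-' ∨ p.2 = '-')))
-- the merged string (valid when pvCnt = 1 and ¬pvDash)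
def pvMerged (l : List (Char × Char)) : List Char := l.map (fun p => if p.1 = p.2 then p.1 else '-')
-- the differing indices
def pvDiffs (l : List (Char × Char)) : List Nat :=
  (List.range l.length).filter (fun i => (l.getD i ('?', '?')).1 ≠ (l.getD i ('?', '?')).2)

lemma pvLoopA_eq (l : List (Char × Char)) : ∀ (diff : Nat) (out : List Char),
    pvLoopA l diff out =
      if pvDash l then none
      else if diff + pvCnt l ≠ 1 then none
      else some (String.mk (out.reverse ++ pvMerged l)) := by
  induction l with
  | nil => intro diff out; simp [pvLoopA, pvDash, pvCnt, pvMerged]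
  | cons p rest ih =>
    intro diff out
    obtain ⟨xa, xb⟩ := p
    by_cases hxy : xa = xb
    · subst hxy
      simp only [pvLoopA, if_pos rfl, ih]
      simp [pvDash, pvCnt, pvMerged]
    · by_cases hd : xa = '-' ∨ xb = '-'
      · simp [pvLoopA, hxy, hd, pvDash]
      · by_cases h1 : diff + 1 > 1
        · have hne : diff + pvCnt ((xa, xb) :: rest) ≠ 1 := by
            simp [pvCnt, hxy]; omega
          simp only [pvLoopA, if_neg hxy, if_neg hd, if_pos h1]
          simp [pvDash, hxy, hd, hne]
        · simp only [pvLoopA, if_neg hxy, if_neg hd, if_neg h1, ih]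
          have hdash : pvDash ((xa, xb) :: rest) = pvDash rest := by
            simp [pvDash, hxy, hd]
          have hcnt : pvCnt ((xa, xb) :: rest) = pvCnt rest + 1 := by
            simp [pvCnt, hxy]
          have hmerge : pvMerged ((xa, xb) :: rest) = '-' :: pvMerged rest := by
            simp [pvMerged, hxy]
          rw [hdash, hcnt, hmerge]
          have : diff + 1 + pvCnt rest = diff + (pvCnt rest + 1) := by omega
          simp [this]

lemma pvDiffs_cons (p : Char × Char) (rest : List (Char × Char)) :
    pvDiffs (p :: rest) =
      (if p.1 ≠ p.2 then [0] else []) ++ (pvDiffs rest).map Nat.succ := by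
  simp only [pvDiffs, List.length_cons, List.range_succ_eq_map, List.filter_cons,
    List.filter_map, Function.comp_def, Nat.succ_eq_add_one, List.getD,
    List.getElem?_cons_zero, List.getElem?_cons_succ, Option.getD_some]
  by_cases h : p.1 = p.2 <;> simp [h]

lemma pvDiffs_length (l : List (Char × Char)) : (pvDiffs l).length = pvCnt l := by
  induction l with
  | nil => simp [pvDiffs, pvCnt]
  | cons p rest ih =>
    rw [pvDiffs_cons]
    by_cases h : p.1 = p.2 <;> simp [pvCnt, h, ih]

lemma pvDiffs_any_dash (l : List (Char × Char)) :
    ((pvDiffs l).any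
        (fun i => decide ((l.getD i ('?', '?')).1 = '-' ∨ (l.getD i ('?', '?')).2 = '-')))
      = pvDash l := by
  induction l with
  | nil => simp [pvDiffs, pvDash]
  | cons p rest ih =>
    rw [pvDiffs_cons]
    by_cases h : p.1 = p.2
    · simpa [pvDash, h, List.any_map, Function.comp] using ih
    · rw [if_pos (show p.1 ≠ p.2 from h)]
      simp only [List.any_append, List.any_map, Function.comp_def, List.getD_cons_succ,
        List.getD_cons_zero, List.any_cons, List.any_nil]
      rw [ih]
      simp [pvDash, h]

lemma pvMerged_cnt_zero (l : List (Char × Char)) (h : pvCnt l = 0) :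
    pvMerged l = l.map Prod.fst := by
  have hnil : l.filter (fun p => decide (p.1 ≠ p.2)) = [] := by
    have := h
    simp only [pvCnt, List.length_eq_zero_iff] at this
    exact this
  have h' : ∀ p ∈ l, p.1 = p.2 := by
    intro p hp
    by_contra hne
    have hm : p ∈ l.filter (fun p => decide (p.1 ≠ p.2)) :=
      List.mem_filter.mpr ⟨hp, by simpa using hne⟩
    rw [hnil] at hm
    simp at hm
  simp only [pvMerged]
  apply List.map_congr_left
  intro p hp
  simp [h' p hp]

lemma pvSet_merged (l : List (Char × Char)) (h : pvCnt l = 1) :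
    (l.map Prod.fst).set ((pvDiffs l).headD 0) '-' = pvMerged l := by
  induction l with
  | nil => simp [pvCnt] at h
  | cons p rest ih =>
    rw [pvDiffs_cons]
    by_cases hp : p.1 = p.2
    · have hc : pvCnt rest = 1 := by simpa [pvCnt, hp, List.filter_cons] using h
      have hne : pvDiffs rest ≠ [] := by
        intro hnil
        have := pvDiffs_length rest
        rw [hnil, hc] at this; simp at this
      obtain ⟨i, tl, hit⟩ := List.exists_cons_of_ne_nil hne
      simp [hp, hit, pvMerged]
      have := ih hc
      rw [hit] at this
      simpa [pvMerged, hp] using this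
    · have hc : pvCnt rest = 0 := by
        have : pvCnt (p :: rest) = pvCnt rest + 1 := by simp [pvCnt, hp]
        omega
      rw [if_pos (show p.1 ≠ p.2 from hp)]
      simp only [List.singleton_append, List.headD_cons, List.map_cons, List.set_cons_zero,
        pvMerged, if_neg hp]
      exact congrArg _ (pvMerged_cnt_zero rest hc).symm

lemma alt_eq (a b : String) :
    combine_if_one_bit_diff_alt a b =
      (if pvDash (a.toList.zip b.toList) then none
       else if pvCnt (a.toList.zip b.toList) ≠ 1 then none
       else some (String.mk (pvMerged (a.toList.zip b.toList)))) := by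
  set l := a.toList.zip b.toList with hl
  show (if (pvDiffs l).any
          (fun i => decide ((l.getD i ('?', '?')).1 = '-' ∨ (l.getD i ('?', '?')).2 = '-')) then none
        else if (pvDiffs l).length ≠ 1 then none
        else some (String.mk ((l.map Prod.fst).set ((pvDiffs l).headD 0) '-'))) = _
  rw [pvDiffs_any_dash, pvDiffs_length]
  by_cases h1 : pvDash l
  · simp [h1]
  · by_cases h2 : pvCnt l = 1
    · rw [pvSet_merged l h2]
    · simp [h1, h2]

-- ===== VERDICT (by name: the statement is the Claim_ definition above) =====
theorem combine_if_one_bit_diff_spec : Claim_equal_combine_if_one_bit_diff := by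
  intro a b _
  show combine_if_one_bit_diff a b = combine_if_one_bit_diff_alt a b
  rw [combine_if_one_bit_diff, pvLoopA_eq, alt_eq]
  simp
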